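-- pv_equiv track=rewrite | github.com/OwlNet-C/CodeWars-Answers | Python/6-Kyu/RowOfOddTriangle.py | odd_row
-- ===== SOURCE A (Python) =====
-- def odd_row(n):
--     arr = []
--     form = 0
--     for each in range(0,2*n,2):
--         form += each
--     num_1 = form +1
--     for each in range(0,n):
--         arr.append(num_1)
--         num_1 +=2
--
--     return(arr)
-- ===== SOURCE B (Python) =====
-- def odd_row(n):
--     start = n * n - n + 1
--     return list(range(start, start + 2 * n, 2))
-- ===== Notes on version B (the rewrite author's own statement) =====
-- stated objective: simpler
-- what changed: Replaces A's summation loop by a closed-form first element and A's append loop by a single range construction with step two.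
import Mathlib
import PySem

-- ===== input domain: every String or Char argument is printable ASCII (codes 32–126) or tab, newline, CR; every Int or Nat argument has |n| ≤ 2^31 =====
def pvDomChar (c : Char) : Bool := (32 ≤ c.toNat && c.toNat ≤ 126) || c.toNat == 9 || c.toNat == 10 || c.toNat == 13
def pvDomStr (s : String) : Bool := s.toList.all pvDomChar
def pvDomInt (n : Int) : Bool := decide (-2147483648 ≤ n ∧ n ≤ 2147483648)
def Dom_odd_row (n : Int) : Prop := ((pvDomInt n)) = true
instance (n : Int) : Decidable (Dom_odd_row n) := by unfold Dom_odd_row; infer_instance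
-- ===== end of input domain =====

-- B replaces A's two loops by the closed form start = n*n - n + 1 and one range construction (objective: simpler).

-- ===== PORT A =====
def odd_row (n : Int) : List Int :=
  let form := (PySem.List.pyRange 0 (2 * n) 2).foldl (fun f e => f + e) 0
  let num_1 := form + 1
  let st := (PySem.List.pyRange 0 n 1).foldl
    (fun (p : List Int × Int) _ => (p.1 ++ [p.2], p.2 + 2)) ([], num_1)
  st.1

-- ===== PORT B =====
def odd_row_alt (n : Int) : List Int :=
  let start := n * n - n + 1
  PySem.List.pyRange start (start + 2 * n) 2

-- ===== PRECONDITION & SPEC =====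
def Spec_odd_row (n : Int) (out : List Int) : Prop := out = odd_row_alt n
instance (n : Int) (out : List Int) : Decidable (Spec_odd_row n out) := by unfold Spec_odd_row; infer_instance

-- ===== CLAIM (what is proved, stated in full; the proofs are below) =====
def Claim_equal_odd_row : Prop := ∀ (n : Int), Dom_odd_row n → Spec_odd_row n (odd_row n)

-- ===== LEMMAS AND PROOFS =====

-- A's append loop: foldl over any list builds arr ++ [x, x+2, …]
theorem odd_row_loop (l : List Int) : ∀ (arr : List Int) (x : Int),
    (l.foldl (fun (p : List Int × Int) _ => (p.1 ++ [p.2], p.2 + 2)) (arr, x)).1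
      = arr ++ (List.range l.length).map (fun k : Nat => x + 2 * (k : Int)) := by
  induction l with
  | nil => intro arr x; simp
  | cons a t ih =>
    intro arr x
    simp only [List.foldl_cons, List.length_cons, ih, List.range_succ_eq_map]
    simp only [List.map_cons, List.map_map]
    simp [List.append_assoc]
    intro a _; ring

-- A's summation loop over [0, 2, …, 2(m-1)]
theorem sum_evens (m : Nat) :
    ((List.range m).map (fun k : Nat => 2 * (k : Int))).foldl (fun f e => f + e) 0
      = (m : Int) * m - m := by
  induction m with
  | zero => simp
  | succ m ih =>
    rw [List.range_succ, List.map_append, List.foldl_append, ih]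
    simp; push_cast; ring

theorem odd_row_spec : Claim_equal_odd_row := by
  intro n _
  unfold Spec_odd_row odd_row odd_row_alt
  rw [PySem.List.pyRange_of_pos 0 (2 * n) (by norm_num : (0:Int) < 2),
      PySem.List.pyRange_of_pos 0 n (by norm_num : (0:Int) < 1),
      PySem.List.pyRange_of_pos _ _ (by norm_num : (0:Int) < 2)]
  by_cases hn : n ≤ 0
  · have h1 : ¬ ((0:Int) < 2 * n) := by omega
    have h2 : ¬ (n * n - n + 1 < n * n - n + 1 + 2 * n) := by omega
    have h3 : ¬ ((0:Int) < n) := by omega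
    rw [if_neg h1, if_neg h2, if_neg h3]
    simp
  · replace hn : 0 < n := by omega
    have hm : ((2 * n - 0 + 2 - 1) / 2).toNat = n.toNat := by omega
    have hm1 : ((n - 0 + 1 - 1) / 1).toNat = n.toNat := by omega
    have hm2 : ((n * n - n + 1 + 2 * n - (n * n - n + 1) + 2 - 1) / 2).toNat = n.toNat := by omega
    rw [if_pos (by omega : (0:Int) < 2 * n), if_pos hn,
        if_pos (by omega : n * n - n + 1 < n * n - n + 1 + 2 * n), hm, hm1, hm2]
    rw [odd_row_loop, List.length_map, List.length_range]
    have h0 : (fun k : Nat => (0:Int) + 2 * k) = (fun k : Nat => 2 * (k : Int)) := by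
      funext k; ring
    simp only [h0, sum_evens, List.nil_append]
    apply List.map_congr_left
    intro k _
    have hnn : (n.toNat : Int) = n := by omega
    rw [hnn]

-- ===== VERDICT (by name: the statement is the Claim_ definition above) =====
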